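-- pv_equiv track=rewrite | github.com/ajnirp/advent-2024 | 7.py | CanSatisfy1
-- ===== SOURCE A (Python) =====
-- def CanSatisfy1(left, right):
--     kNumBits = len(right) - 1
--     for i in range(1 << kNumBits):
--         binary_string = bin(i)[2:].rjust(kNumBits, '0')
--         result = right[0]
--         for j, char in enumerate(binary_string):
--             if char == '0':
--                 result += right[j + 1]
--             else:
--                 result *= right[j + 1]
--         if result == left:
--             return True
--     return False
-- ===== SOURCE B (Python) =====
-- def CanSatisfy1(left, right):
--     reach = {right[0]}
--     for x in right[1:]:
--         reach = {op for v in reach for op in (v + x, v * x)}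
--     return left in reach
-- ===== Notes on version B (the rewrite author's own statement) =====
-- stated objective: alternative
-- what changed: B replaces A's enumeration of all 2^(n-1) operator bit-strings (with per-candidate bin/rjust string formatting) by a single forward pass maintaining the set of values reachable so far; it deduplicates as it goes but in the worst case the set is still exponential.
import Mathlib
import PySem

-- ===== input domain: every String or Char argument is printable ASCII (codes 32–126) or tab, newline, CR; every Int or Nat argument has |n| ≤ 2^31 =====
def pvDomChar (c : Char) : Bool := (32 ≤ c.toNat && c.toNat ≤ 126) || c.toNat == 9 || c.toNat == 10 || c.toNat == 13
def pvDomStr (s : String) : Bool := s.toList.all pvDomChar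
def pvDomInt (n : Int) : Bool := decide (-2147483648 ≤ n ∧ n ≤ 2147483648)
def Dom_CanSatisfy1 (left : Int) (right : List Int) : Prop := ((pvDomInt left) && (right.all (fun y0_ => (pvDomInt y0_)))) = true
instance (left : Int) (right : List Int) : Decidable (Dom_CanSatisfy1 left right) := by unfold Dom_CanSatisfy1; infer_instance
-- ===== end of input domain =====

-- B replaces A's enumeration of all 2^(n-1) operator strings by a forward reachable-value set
-- (a set DP over the operands); equivalence of the RETURN values is proved for len(right) ≥ 2.

-- ===== PORT A =====
-- bin(i)[2:] for i ≥ 0 is Nat.toDigits 2 i; .rjust(k, '0') is left-padding with replicate (exact: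
-- rjust never truncates and k - len is Nat subtraction, clamped at 0 exactly as rjust keeps a longer string).
-- right[0] and right[j+1] are ported with List.getD; inside Pre_ (len(right) ≥ 2) every such index is
-- in range, so getD is exact there (Python would raise IndexError only when len(right) < 2).
def CanSatisfy1 (left : Int) (right : List Int) : Bool :=
  let kNumBits := right.length - 1
  (List.range (1 <<< kNumBits)).any (fun i =>
    let binaryString := List.replicate (kNumBits - (Nat.toDigits 2 i).length) '0' ++ Nat.toDigits 2 i
    let result := binaryString.zipIdx.foldl
      (fun acc p => if p.1 = '0' then acc + right.getD (p.2 + 1) 0 else acc * right.getD (p.2 + 1) 0)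
      (right.getD 0 0)
    result == left)

-- ===== PORT B =====
-- transliteration of Source B: reach = {right[0]}; for x in right[1:]: reach = {v+x, v*x : v ∈ reach};
-- left in reach.  (Source B raises IndexError on right = []; that input is outside Pre_, the port returns false.)
def CanSatisfy1_alt (left : Int) (right : List Int) : Bool :=
  match right with
  | [] => false
  | r0 :: rest =>
    (rest.foldl
      (fun (reach : PySem.Set Int) x =>
        PySem.Set.ofList (reach.flatMap (fun v => [v + x, v * x])))
      (PySem.Set.ofList [r0])).contains left

-- ===== PRECONDITION & SPEC =====
-- A raises on len(right) < 2: ValueError (range(1 << -1)) for [], IndexError (right[1]) for a singleton.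
def Pre_CanSatisfy1 (left : Int) (right : List Int) : Prop := 2 ≤ right.length
instance (left : Int) (right : List Int) : Decidable (Pre_CanSatisfy1 left right) := by
  unfold Pre_CanSatisfy1; infer_instance
def pvWitness_CanSatisfy1 : Int × List Int := (6, [2, 3])

def Spec_CanSatisfy1 (left : Int) (right : List Int) (out : Bool) : Prop := out = CanSatisfy1_alt left right
instance (left : Int) (right : List Int) (out : Bool) : Decidable (Spec_CanSatisfy1 left right out) := by
  unfold Spec_CanSatisfy1; infer_instance

-- ===== CLAIM (what is proved, stated in full; the proofs are below) =====
def Claim_equal_CanSatisfy1 : Prop := ∀ (left : Int) (right : List Int), Dom_CanSatisfy1 left right → Pre_CanSatisfy1 left right → Spec_CanSatisfy1 left right (CanSatisfy1 left right)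

-- ===== LEMMAS AND PROOFS =====

-- all values obtainable from v by folding +/× through xs (the common semantics of A and B)
def results (v : Int) : List Int → List Int
  | [] => [v]
  | x :: xs => results (v + x) xs ++ results (v * x) xs

-- A's inner loop as a structural two-list recursion
def evalA (v : Int) : List Int → List Char → Int
  | [], _ => v
  | _ :: _, [] => v
  | r :: rs, c :: cs => evalA (if c = '0' then v + r else v * r) rs cs

theorem results_append_singleton (v x : Int) (rs : List Int) :
    results v (rs ++ [x]) = (results v rs).flatMap (fun w => [w + x, w * x]) := by
  induction rs generalizing v with
  | nil => simp [results]
  | cons y ys ih => simp [results, ih]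

theorem mem_results_append_singleton (t v x : Int) (rs : List Int) :
    t ∈ results v (rs ++ [x]) ↔ ∃ w ∈ results v rs, w + x = t ∨ w * x = t := by
  rw [results_append_singleton]
  simp only [List.mem_flatMap, List.mem_cons]
  constructor
  · rintro ⟨w, hw, h | h | h⟩
    · exact ⟨w, hw, Or.inl h.symm⟩
    · exact ⟨w, hw, Or.inr h.symm⟩
    · cases h
  · rintro ⟨w, hw, h | h⟩
    · exact ⟨w, hw, Or.inl h.symm⟩
    · exact ⟨w, hw, Or.inr (Or.inl h.symm)⟩


-- fold of A's enumerate-loop body equals evalA on the remaining operands (indices are absolute into rs)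
theorem foldA_zipIdx (rs : List Int) (bs : List Char) (k : Nat) (v : Int)
    (h : k + bs.length ≤ rs.length) :
    (bs.zipIdx k).foldl
      (fun acc p => if p.1 = '0' then acc + rs.getD p.2 0 else acc * rs.getD p.2 0) v
    = evalA v (rs.drop k) bs := by
  induction bs generalizing k v with
  | nil => cases hd : rs.drop k with
    | nil => simp [evalA]
    | cons a l => simp [evalA]
  | cons c cs ih =>
    have hk : k < rs.length := by simp at h; omega
    have hdrop : rs.drop k = rs[k] :: rs.drop (k + 1) := List.drop_eq_getElem_cons hk
    have hgd : rs.getD k 0 = rs[k] := by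
      simp [List.getD_eq_getElem?_getD, List.getElem?_eq_getElem hk]
    simp only [List.zipIdx_cons, List.foldl_cons, hdrop, evalA, hgd]
    rw [ih (k + 1) _ (by simp at h ⊢; omega)]

-- rjust padding: for a string no longer than m+1, padding to m+1 after appending the last binary digit
-- is padding to m then appending
theorem pad_append (m : Nat) (s : List Char) (c : Char) (hs : s.length ≤ m) :
    List.replicate (m + 1 - (s ++ [c]).length) '0' ++ (s ++ [c])
    = (List.replicate (m - s.length) '0' ++ s) ++ [c] := by
  simp only [List.length_append, List.length_singleton, List.append_assoc]
  congr 2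
  omega

-- the padded binary string of 2*j + b (b < 2, j < 2^m, 1 ≤ m) is the padded string of j plus the digit b
theorem pad_bin_step (m j b : Nat) (hm : 1 ≤ m) (hj : j < 2 ^ m) (hb : b < 2) :
    List.replicate (m + 1 - (Nat.toDigits 2 (2 * j + b)).length) '0' ++ Nat.toDigits 2 (2 * j + b)
    = (List.replicate (m - (Nat.toDigits 2 j).length) '0' ++ Nat.toDigits 2 j) ++ [Nat.digitChar b] := by
  have hjlen : (Nat.toDigits 2 j).length ≤ m := (Nat.length_toDigits_le_iff (by norm_num) hm).mpr hj
  by_cases hj0 : j = 0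
  · subst hj0
    have : Nat.toDigits 2 b = [Nat.digitChar b] := Nat.toDigits_of_lt_base hb
    have h0 : Nat.toDigits 2 0 = ['0'] := by decide
    simp only [Nat.mul_zero, Nat.zero_add, this, h0]
    simp only [List.length_singleton]
    have hrep : List.replicate (m - 1) '0' ++ ['0'] = List.replicate m '0' := by
      rw [← List.replicate_succ']
      congr 1
      omega
    calc List.replicate (m + 1 - 1) '0' ++ [Nat.digitChar b]
        = List.replicate m '0' ++ [Nat.digitChar b] := by norm_num
      _ = (List.replicate (m - 1) '0' ++ ['0']) ++ [Nat.digitChar b] := by rw [hrep]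
  · have h2 : ¬ (2 * j + b < 2) := by omega
    have hdiv : (2 * j + b) / 2 = j := by omega
    have hmod : (2 * j + b) % 2 = b := by omega
    have hbin : Nat.toDigits 2 (2 * j + b) = Nat.toDigits 2 j ++ [Nat.digitChar b] := by
      rw [Nat.toDigits_eq_if (by norm_num : (1:Nat) < 2), if_neg h2, hdiv, hmod]
    rw [hbin, pad_append m _ _ hjlen]

-- evalA distributes over appending the final operand / final char (lockstep lengths)
theorem evalA_append (rs : List Int) (cs : List Char) (x : Int) (c : Char) (v : Int)
    (h : cs.length = rs.length) :
    evalA v (rs ++ [x]) (cs ++ [c]) = (if c = '0' then evalA v rs cs + x else evalA v rs cs * x) := by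
  induction rs generalizing cs v with
  | nil => cases cs with
    | nil => simp [evalA]
    | cons a l => simp at h
  | cons r rs ih =>
    cases cs with
    | nil => simp at h
    | cons d ds =>
      simp only [List.cons_append, evalA]
      exact ih ds _ (by simpa using h)

-- characterisation of A's enumeration: over all i < 2^len the padded binary strings evaluate to
-- exactly the reachable values
theorem A_char (rest : List Int) (hne : rest ≠ []) (v t : Int) :
    (∃ i < 2 ^ rest.length,
        evalA v rest (List.replicate (rest.length - (Nat.toDigits 2 i).length) '0' ++ Nat.toDigits 2 i) = t)
    ↔ t ∈ results v rest := by
  induction rest using List.reverseRecOn generalizing v t with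
  | nil => exact absurd rfl hne
  | append_singleton rs x ih =>
    by_cases hrs : rs = []
    · subst hrs
      simp only [List.nil_append, List.length_singleton]
      constructor
      · rintro ⟨i, hi, he⟩
        interval_cases i
        · have : Nat.toDigits 2 0 = ['0'] := by decide
          simp [this, evalA, results] at he ⊢
          exact Or.inl he.symm
        · have : Nat.toDigits 2 1 = ['1'] := by decide
          simp [this, evalA, results] at he ⊢
          exact Or.inr he.symm
      · intro ht
        simp [results] at ht
        rcases ht with h | h
        · exact ⟨0, by norm_num, by simp [show Nat.toDigits 2 0 = ['0'] from by decide, evalA, h]⟩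
        · exact ⟨1, by norm_num, by simp [show Nat.toDigits 2 1 = ['1'] from by decide, evalA, h]⟩
    · have hm : 1 ≤ rs.length := by
        cases rs with
        | nil => exact absurd rfl hrs
        | cons a l => simp
      have hlen : (rs ++ [x]).length = rs.length + 1 := by simp
      rw [mem_results_append_singleton]
      constructor
      · rintro ⟨i, hi, he⟩
        rw [hlen] at hi
        have hi2 : 2 * (i / 2) + i % 2 = i := by omega
        have hj : i / 2 < 2 ^ rs.length := by
          rw [pow_succ] at hi; omega
        have hb : i % 2 < 2 := Nat.mod_lt _ (by norm_num)
        rw [← hi2, hlen, pad_bin_step rs.length (i / 2) (i % 2) hm hj hb] at he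
        have hjlen : (Nat.toDigits 2 (i / 2)).length ≤ rs.length :=
          (Nat.length_toDigits_le_iff (by norm_num) hm).mpr hj
        rw [evalA_append rs _ x _ v (by simp; omega)] at he
        refine ⟨evalA v rs (List.replicate (rs.length - (Nat.toDigits 2 (i / 2)).length) '0' ++ Nat.toDigits 2 (i / 2)), ?_, ?_⟩
        · exact (ih hrs v _).mp ⟨i / 2, hj, rfl⟩
        · rcases hb2 : i % 2 with _ | b
          · rw [hb2] at he
            simp [Nat.digitChar] at he
            exact Or.inl he
          · have hb1 : i % 2 = 1 := by omega
            rw [hb1] at he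
            simp [Nat.digitChar] at he
            exact Or.inr he
      · rintro ⟨w, hw, hwt⟩
        obtain ⟨j, hj, hje⟩ := (ih hrs v w).mpr hw
        have hjlen : (Nat.toDigits 2 j).length ≤ rs.length :=
          (Nat.length_toDigits_le_iff (by norm_num) hm).mpr hj
        rcases hwt with h | h
        · refine ⟨2 * j, by rw [hlen, pow_succ]; omega, ?_⟩
          rw [hlen, show 2 * j = 2 * j + 0 by omega, pad_bin_step rs.length j 0 hm hj (by norm_num),
              evalA_append rs _ x _ v (by simp; omega)]
          simp [Nat.digitChar, hje, h]
        · refine ⟨2 * j + 1, by rw [hlen, pow_succ]; omega, ?_⟩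
          rw [hlen, pad_bin_step rs.length j 1 hm hj (by norm_num),
              evalA_append rs _ x _ v (by simp; omega)]
          simp [Nat.digitChar, hje, h]

-- B's set-DP invariant: after folding xs, the reach set holds exactly the values reachable from some seed
theorem B_invariant (xs : List Int) (acc : List Int) (t : Int) :
    (xs.foldl
      (fun (reach : PySem.Set Int) x =>
        PySem.Set.ofList (reach.flatMap (fun v => [v + x, v * x]))) acc).contains t = true
    ↔ ∃ v ∈ acc, t ∈ results v xs := by
  induction xs generalizing acc with
  | nil =>
    simp [results]
  | cons x xs ih =>
    simp only [List.foldl_cons]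
    rw [ih]
    constructor
    · rintro ⟨v, hv, hres⟩
      rw [PySem.Set.mem_ofList, List.mem_flatMap] at hv
      obtain ⟨w, hw, hvw⟩ := hv
      refine ⟨w, hw, ?_⟩
      simp only [results, List.mem_append]
      simp only [List.mem_cons] at hvw
      rcases hvw with h | h | h
      · subst h; exact Or.inl hres
      · subst h; exact Or.inr hres
      · cases h
    · rintro ⟨w, hw, hres⟩
      simp only [results, List.mem_append] at hres
      rcases hres with h | h
      · exact ⟨w + x, by rw [PySem.Set.mem_ofList, List.mem_flatMap]; exact ⟨w, hw, by simp⟩, h⟩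
      · exact ⟨w * x, by rw [PySem.Set.mem_ofList, List.mem_flatMap]; exact ⟨w, hw, by simp⟩, h⟩


-- ===== VERDICT (by name: the statement is the Claim_ definition above) =====
-- pointwise: A's inner fold over the padded binary string is evalA on rest
theorem inner_fold_eq (rest : List Int) (r0 : Int) (i : Nat)
    (hlen : (Nat.toDigits 2 i).length ≤ rest.length) :
    ((List.replicate (rest.length - (Nat.toDigits 2 i).length) '0' ++ Nat.toDigits 2 i).zipIdx.foldl
      (fun acc p => if p.1 = '0' then acc + rest.getD p.2 0 else acc * rest.getD p.2 0) r0)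
    = evalA r0 rest (List.replicate (rest.length - (Nat.toDigits 2 i).length) '0' ++ Nat.toDigits 2 i) := by
  have h := foldA_zipIdx rest
    (List.replicate (rest.length - (Nat.toDigits 2 i).length) '0' ++ Nat.toDigits 2 i) 0 r0
    (by simp; omega)
  simpa using h

theorem CanSatisfy1_spec : Claim_equal_CanSatisfy1 := by
  intro left right _ hpre
  unfold Pre_CanSatisfy1 at hpre
  unfold Spec_CanSatisfy1
  cases right with
  | nil => simp at hpre
  | cons r0 rest =>
    have hne : rest ≠ [] := by
      cases rest with
      | nil => simp at hpre
      | cons a l => simp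
    have hpos : 0 < rest.length := by
      cases rest with
      | nil => exact absurd rfl hne
      | cons a l => simp
    have hA : CanSatisfy1 left (r0 :: rest) = true ↔ left ∈ results r0 rest := by
      unfold CanSatisfy1
      simp only [List.length_cons, Nat.add_sub_cancel, Nat.one_shiftLeft, List.any_eq_true,
        List.mem_range, List.getD_cons_succ, List.getD_cons_zero, beq_iff_eq]
      rw [← A_char rest hne r0 left]
      constructor
      · rintro ⟨i, hi, he⟩
        have hlen : (Nat.toDigits 2 i).length ≤ rest.length :=
          (Nat.length_toDigits_le_iff (by norm_num) hpos).mpr hi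
        exact ⟨i, hi, by rw [← inner_fold_eq rest r0 i hlen]; exact he⟩
      · rintro ⟨i, hi, he⟩
        have hlen : (Nat.toDigits 2 i).length ≤ rest.length :=
          (Nat.length_toDigits_le_iff (by norm_num) hpos).mpr hi
        exact ⟨i, hi, by rw [inner_fold_eq rest r0 i hlen]; exact he⟩
    have hB : CanSatisfy1_alt left (r0 :: rest) = true ↔ left ∈ results r0 rest := by
      rw [show CanSatisfy1_alt left (r0 :: rest)
            = (rest.foldl
                (fun (reach : PySem.Set Int) x =>
                  PySem.Set.ofList (reach.flatMap (fun v => [v + x, v * x])))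
                [r0]).contains left from rfl, B_invariant]
      simp
    rw [Bool.eq_iff_iff]
    exact hA.trans hB.symm
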